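-- pv_equiv track=rewrite | github.com/Deotratierra/fullstack | backend/src/algoritmos/arrays/contador_circular/circular_selector.py | circular_selector
-- ===== SOURCE A (Python) =====
-- def circular_selector(int_list, skip):
--     skip = skip - 1
--     idx = 0
--     len_list = len(int_list)
--     while len_list > 0:
--         idx = (skip + idx) % len_list
--         yield int_list.pop(idx)
--         len_list -= 1
-- ===== SOURCE B (Python) =====
-- # B: alive-mask selection: keep the original list intact plus a boolean mask,
-- # each round find the pos-th surviving element by a counting scan and mark it
-- # dead; no pop/rotation, and B does not mutate int_list (A consumes it with pop).
-- def _kth_alive(alive, pos):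
--     cnt = -1
--     for j, a in enumerate(alive):
--         if a:
--             cnt += 1
--             if cnt == pos:
--                 return j
--
-- def circular_selector(int_list, skip):
--     k0 = skip - 1
--     alive = [True] * len(int_list)
--     remaining = len(int_list)
--     pos = 0
--     while remaining > 0:
--         pos = (k0 + pos) % remaining
--         j = _kth_alive(alive, pos)
--         alive[j] = False
--         remaining -= 1
--         yield int_list[j]
-- ===== Notes on version B (the rewrite author's own statement) =====
-- stated objective: alternative
-- what changed: replaces A's shrinking-list pop at a tracked index with an immutable original list plus a boolean alive-mask, selecting each victim by a counting scan for the pos-th survivor and marking it dead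
import Mathlib
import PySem

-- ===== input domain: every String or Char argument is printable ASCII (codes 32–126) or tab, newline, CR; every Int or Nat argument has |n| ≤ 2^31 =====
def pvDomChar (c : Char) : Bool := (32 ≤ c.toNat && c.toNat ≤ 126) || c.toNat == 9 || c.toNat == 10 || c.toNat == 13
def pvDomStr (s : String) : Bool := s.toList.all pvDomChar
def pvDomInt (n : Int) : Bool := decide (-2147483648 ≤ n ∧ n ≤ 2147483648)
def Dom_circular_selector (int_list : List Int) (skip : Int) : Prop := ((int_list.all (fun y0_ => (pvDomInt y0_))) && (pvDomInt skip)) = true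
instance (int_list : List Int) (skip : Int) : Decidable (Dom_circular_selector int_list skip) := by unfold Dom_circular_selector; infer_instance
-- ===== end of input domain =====

-- B replaces A's shrinking-list pop at a tracked index by an immutable list plus a boolean
-- alive-mask with a counting scan for the pos-th survivor; equivalence is about the yielded
-- sequence only (A pops from the caller's list, B does not mutate it).

-- ===== PORT A =====
-- A's while loop: fuel = len_list (which always equals the current list's length);
-- idx is the running index, skip already decremented at the call site.
def circularSelGo : Nat → List Int → Int → Int → List Int
  | 0, _, _, _ => []
  | n + 1, l, skip, idx =>
    let j := PySem.Int.mod (skip + idx) ((n : Int) + 1)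
    match PySem.List.pop? l j with
    | some (x, l') => x :: circularSelGo n l' skip j
    | none => []

def circular_selector (int_list : List Int) (skip : Int) : List Int :=
  circularSelGo int_list.length int_list (skip - 1) 0

-- ===== PORT B =====
-- _kth_alive's for loop: cnt the running count of survivors seen, j the absolute index;
-- returns none when the loop falls through without the break-return (never hit by the caller).
def kthAliveGo : List Bool → Int → Int → Nat → Option Nat
  | [], _, _, _ => none
  | a :: rest, pos, cnt, j =>
    if a then
      let cnt' := cnt + 1
      if cnt' = pos then some j else kthAliveGo rest pos cnt' (j + 1)
    else kthAliveGo rest pos cnt (j + 1)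

def kthAlive (alive : List Bool) (pos : Int) : Option Nat :=
  kthAliveGo alive pos (-1) 0

-- Source B's while loop: fuel = remaining; prev is the previous pos.
def circAltGo : Nat → List Bool → List Int → Int → Int → List Int
  | 0, _, _, _, _ => []
  | r + 1, alive, orig, k0, prev =>
    let pos := PySem.Int.mod (k0 + prev) ((r : Int) + 1)
    match kthAlive alive pos with
    | some j =>
      match PySem.List.pyGet? orig (j : Int) with
      | some x => x :: circAltGo r (alive.set j false) orig k0 pos
      | none => []
    | none => []

def circular_selector_alt (int_list : List Int) (skip : Int) : List Int :=
  circAltGo int_list.length (List.replicate int_list.length true) int_list (skip - 1) 0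

-- ===== PRECONDITION & SPEC =====
def Spec_circular_selector (int_list : List Int) (skip : Int) (out : List Int) : Prop := out = circular_selector_alt int_list skip
instance (int_list : List Int) (skip : Int) (out : List Int) : Decidable (Spec_circular_selector int_list skip out) := by unfold Spec_circular_selector; infer_instance

-- ===== CLAIM (what is proved, stated in full; the proofs are below) =====
def Claim_equal_circular_selector : Prop := ∀ (int_list : List Int) (skip : Int), Dom_circular_selector int_list skip → Spec_circular_selector int_list skip (circular_selector int_list skip)

-- ===== LEMMAS AND PROOFS =====

-- The survivors of `orig` under mask `alive` (positionally aligned).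
def maskF : List Int → List Bool → List Int
  | [], _ => []
  | _, [] => []
  | x :: xs, a :: as_ => if a then x :: maskF xs as_ else maskF xs as_

lemma maskF_replicate : ∀ (l : List Int), maskF l (List.replicate l.length true) = l := by
  intro l
  induction l with
  | nil => rfl
  | cons x xs ih => simp [maskF, List.replicate, ih]

-- Core: the counting scan finds the p-th survivor; its original value is the p-th element
-- of the masked list, and killing it erases that position from the masked list.
lemma kthAliveGo_spec : ∀ (alive : List Bool) (orig : List Int) (cnt : Int) (p j : Nat),
    alive.length = orig.length → p < (maskF orig alive).length →
    ∃ off, off < alive.length ∧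
      kthAliveGo alive (cnt + 1 + (p : Int)) cnt j = some (j + off) ∧
      orig[off]? = (maskF orig alive)[p]? ∧
      maskF orig (alive.set off false) = (maskF orig alive).eraseIdx p := by
  intro alive
  induction alive with
  | nil =>
    intro orig cnt p j hlen hp
    cases orig with
    | nil => simp [maskF] at hp
    | cons y ys => simp at hlen
  | cons a rest ih =>
    intro orig cnt p j hlen hp
    cases orig with
    | nil => simp at hlen
    | cons y ys =>
      have hlen' : rest.length = ys.length := by simpa using hlen
      cases a with
      | true =>
        cases p with
        | zero =>
          refine ⟨0, by simp, ?_, by simp [maskF], by simp [maskF]⟩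
          simp [kthAliveGo]
        | succ p' =>
          have hp' : p' < (maskF ys rest).length := by
            simpa [maskF] using hp
          obtain ⟨off, hofflt, hgo, hget, herase⟩ := ih ys (cnt + 1) p' (j + 1) hlen' hp'
          refine ⟨off + 1, by simpa using Nat.succ_lt_succ hofflt, ?_, ?_, ?_⟩
          · have hne : cnt + 1 ≠ cnt + 1 + ((p' : Int) + 1) := by
              have : (0 : Int) ≤ (p' : Int) := Int.natCast_nonneg _
              omega
            have harg : cnt + 1 + ((p'.succ : Nat) : Int) = (cnt + 1) + 1 + (p' : Int) := by
              push_cast; ring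
            simp only [kthAliveGo, if_true]
            rw [harg]
            have hne' : ¬ (cnt + 1 = (cnt + 1) + 1 + (p' : Int)) := by
              have : (0 : Int) ≤ (p' : Int) := Int.natCast_nonneg _
              omega
            simp only [hne', if_false, hgo]
            congr 1
            omega
          · simpa [maskF] using hget
          · simp only [List.set, maskF]
            simpa [maskF] using herase
      | false =>
        have hp' : p < (maskF ys rest).length := by simpa [maskF] using hp
        obtain ⟨off, hofflt, hgo, hget, herase⟩ := ih ys cnt p (j + 1) hlen' hp'
        refine ⟨off + 1, by simpa using Nat.succ_lt_succ hofflt, ?_, ?_, ?_⟩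
        · simp only [kthAliveGo, if_false, Bool.false_eq_true, hgo]
          congr 1
          omega
        · simpa [maskF] using hget
        · simp only [List.set, maskF]
          simpa [maskF] using herase

-- Main invariant: A's surviving list is the masked filter of B's immutable list.
lemma goEq : ∀ (r : Nat) (alive : List Bool) (orig : List Int) (s i : Int),
    alive.length = orig.length → (maskF orig alive).length = r →
    circularSelGo r (maskF orig alive) s i = circAltGo r alive orig s i := by
  intro r
  induction r with
  | zero => intro alive orig s i _ _; simp [circularSelGo, circAltGo]
  | succ n ih =>
    intro alive orig s i hlen hflen
    set l := maskF orig alive with hl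
    have hpos : (0 : Int) < (n : Int) + 1 := by positivity
    obtain ⟨jn, hj⟩ : ∃ jn : Nat, (jn : Int) = (s + i) % ((n : Int) + 1) :=
      ⟨_, Int.toNat_of_nonneg (Int.emod_nonneg _ (by omega))⟩
    have hjlt : (jn : Int) < (n : Int) + 1 := by rw [hj]; exact Int.emod_lt_of_pos _ hpos
    have hjlen : jn < l.length := by omega
    have hjmod : PySem.Int.mod (s + i) ((n : Int) + 1) = (jn : Int) := by
      rw [PySem.Int.mod_eq_emod_of_pos hpos, hj]
    obtain ⟨off, hofflt, hgo, hget, herase⟩ :=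
      kthAliveGo_spec alive orig (-1) jn 0 hlen hjlen
    have hgo' : kthAlive alive ((jn : Int)) = some off := by
      unfold kthAlive
      have : (-1 : Int) + 1 + (jn : Int) = (jn : Int) := by ring
      rw [← this, hgo]
      simp
    have hofforig : off < orig.length := by omega
    have hgetv : orig[off]? = some l[jn] := by
      rw [hget]
      exact List.getElem?_eq_getElem hjlen
    simp only [circularSelGo, circAltGo, hjmod, hgo']
    rw [PySem.List.pop?_natCast l jn hjlen, PySem.List.pyGet?_natCast, hgetv]
    have hsetlen : (alive.set off false).length = orig.length := by simpa using hlen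
    have herlen : (maskF orig (alive.set off false)).length = n := by
      rw [herase, List.length_eraseIdx_of_lt hjlen, hflen]
      omega
    have hrec := ih (alive.set off false) orig s (jn : Int) hsetlen herlen
    rw [herase, ← hl] at hrec
    show l[jn] :: circularSelGo n (l.eraseIdx jn) s (jn : Int)
        = l[jn] :: circAltGo n (alive.set off false) orig s (jn : Int)
    rw [hrec]

-- ===== VERDICT (by name: the statement is the Claim_ definition above) =====
theorem circular_selector_spec : Claim_equal_circular_selector := by
  intro l s _
  unfold Spec_circular_selector circular_selector circular_selector_alt
  have hm := maskF_replicate l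
  have := goEq l.length (List.replicate l.length true) l (s - 1) 0 (by simp) (by rw [hm])
  rw [hm] at this
  exact this
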